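-- pv_equiv track=rewrite | github.com/micwill755/algorithms | graphs/matrices/path_between_two_cells.py | dfs_find_path
-- ===== SOURCE A (Python) =====
-- def dfs_find_path(m, s, d, visited, p, found):
--     # Mark the current element as visited
--     visited[s[0]][s[1]] = True
--
--     # if we have reached he destination
--     if s == d:
--         # add the destination to path
--         found[0] = True
--         return
--
--     # get neighbours
--     neighbours = get_neighbours(m, s[0], s[1], visited)
--
--     for n in neighbours:
--         # if the neighbour is not visited
--         if not visited[n[0]][n[1]] and not found[0]:
--             if m[n[0]][n[1]] == 3 or m[n[0]][n[1]] == 2: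
--                 p.append(n)
--                 dfs_find_path(m, n, d, visited, p, found)
--
--     return found[0]
--
-- def get_neighbours(m, x, y, visited):
--     neighbours = []
--     # check left
--     if x > 0 and m[x-1][y] != 0 and not visited[x-1][y]:
--         neighbours.append([x-1, y])
--     # check right
--     if x < len(m)-1 and m[x+1][y] != 0 and not visited[x+1][y]:
--         neighbours.append([x+1, y])
--     # check up
--     if y > 0 and m[x][y-1] != 0 and not visited[x][y-1]:
--         neighbours.append([x, y-1])
--     # check down
--     if y < len(m[0])-1 and m[x][y+1] != 0 and not visited[x][y+1]:
--         neighbours.append([x, y+1])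
--     return neighbours
-- ===== SOURCE B (Python) =====
-- # Iterative DFS with an explicit stack instead of recursion; same return value, and
-- # the same in-place mutations of visited, p and found as the recursive original.
-- def dfs_find_path(m, s, d, visited, p, found):
--     visited[s[0]][s[1]] = True
--     if s == d:
--         found[0] = True
--         return found[0]
--     stack = []
--     for n in reversed(get_neighbours(m, s[0], s[1], visited)):
--         if m[n[0]][n[1]] in (3, 2):
--             stack.append(n)
--     while stack:
--         c = stack.pop()
--         if found[0] or visited[c[0]][c[1]]:
--             continue
--         p.append(c)
--         visited[c[0]][c[1]] = True
--         if c == d: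
--             found[0] = True
--             continue
--         for n in reversed(get_neighbours(m, c[0], c[1], visited)):
--             if m[n[0]][n[1]] in (3, 2):
--                 stack.append(n)
--     return found[0]
--
-- def get_neighbours(m, x, y, visited):
--     neighbours = []
--     if x > 0 and m[x-1][y] != 0 and not visited[x-1][y]:
--         neighbours.append([x-1, y])
--     if x < len(m)-1 and m[x+1][y] != 0 and not visited[x+1][y]:
--         neighbours.append([x+1, y])
--     if y > 0 and m[x][y-1] != 0 and not visited[x][y-1]:
--         neighbours.append([x, y-1])
--     if y < len(m[0])-1 and m[x][y+1] != 0 and not visited[x][y+1]: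
--         neighbours.append([x, y+1])
--     return neighbours
-- ===== Notes on version B (the rewrite author's own statement) =====
-- stated objective: alternative
-- what changed: The recursive DFS is replaced by an iterative DFS over an explicit stack: cells are pushed value-filtered in reversed neighbour order and the visited/found guards are re-checked at pop time, reproducing the recursion's exact visiting order and all in-place mutations of visited, p and found.
-- outside the precondition, e.g. on dfs_find_path([[2]], [0, 0], [0, 0], [[False]], [], [False]): A returns None, B returns True
import Mathlib
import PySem

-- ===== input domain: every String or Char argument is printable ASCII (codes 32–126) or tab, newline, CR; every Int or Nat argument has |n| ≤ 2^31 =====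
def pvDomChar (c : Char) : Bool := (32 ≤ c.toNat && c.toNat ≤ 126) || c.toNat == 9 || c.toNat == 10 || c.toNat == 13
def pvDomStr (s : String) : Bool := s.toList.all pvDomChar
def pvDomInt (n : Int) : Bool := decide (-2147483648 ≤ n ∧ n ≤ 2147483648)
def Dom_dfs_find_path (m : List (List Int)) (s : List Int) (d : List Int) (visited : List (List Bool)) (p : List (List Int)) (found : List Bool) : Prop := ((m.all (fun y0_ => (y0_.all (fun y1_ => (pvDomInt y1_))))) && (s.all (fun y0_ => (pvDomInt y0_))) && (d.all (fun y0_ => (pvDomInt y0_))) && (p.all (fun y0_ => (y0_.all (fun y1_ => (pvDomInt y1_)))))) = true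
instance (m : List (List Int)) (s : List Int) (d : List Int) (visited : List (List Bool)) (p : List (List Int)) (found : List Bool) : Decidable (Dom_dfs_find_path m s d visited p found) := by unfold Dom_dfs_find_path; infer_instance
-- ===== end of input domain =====

-- B replaces A's recursive DFS by an iterative DFS over an explicit stack (same cost, different
-- decomposition); A and B mutate visited/p/found identically in Python, and the theorem below is
-- about the returned Bool.

-- ===== PORT A =====
-- shared state of the search: (visited, p, found), threaded instead of mutated
abbrev DfsSt := List (List Bool) × List (List Int) × List Bool

-- l[0], l[1] — exact for the length-≥-2 lists Pre_ admits (Python raises on shorter ones)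
def pvG0 (l : List Int) : Int := l.getD 0 0
def pvG1 (l : List Int) : Int := l.getD 1 0
-- visited[i][j] / visited[i][j] = True / m[i][j] — exact for the nonnegative in-range
-- indices that occur under Pre_ (Python raises outside; negative indices never occur here)
def vgetN (v : List (List Bool)) (a b : Nat) : Bool := (v.getD a []).getD b false
def vget (v : List (List Bool)) (i j : Int) : Bool := vgetN v i.toNat j.toNat
def vsetN (v : List (List Bool)) (a b : Nat) : List (List Bool) := v.set a ((v.getD a []).set b true)
def vset (v : List (List Bool)) (i j : Int) : List (List Bool) := vsetN v i.toNat j.toNat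
def mget (m : List (List Int)) (i j : Int) : Int := (m.getD i.toNat []).getD j.toNat 0
-- found[0] / found[0] = True — exact for the nonempty found Pre_ admits
def pvF0 (f : List Bool) : Bool := f.getD 0 false
def setf (f : List Bool) : List Bool := match f with | [] => [] | _ :: t => true :: t

def get_neighbours_port (m : List (List Int)) (x y : Int) (visited : List (List Bool)) : List (List Int) :=
  (if x > 0 ∧ mget m (x-1) y ≠ 0 ∧ vget visited (x-1) y = false then [[x-1, y]] else []) ++
  (if x < (m.length : Int) - 1 ∧ mget m (x+1) y ≠ 0 ∧ vget visited (x+1) y = false then [[x+1, y]] else []) ++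
  (if y > 0 ∧ mget m x (y-1) ≠ 0 ∧ vget visited x (y-1) = false then [[x, y-1]] else []) ++
  (if y < ((m.getD 0 []).length : Int) - 1 ∧ mget m x (y+1) ≠ 0 ∧ vget visited x (y+1) = false then [[x, y+1]] else [])

-- number of unvisited cells: only used as a provably sufficient totality guard (fuel)
def cfNat (v : List (List Bool)) : Nat := (v.map (fun r => r.count false)).sum

-- A's recursion, fuel only as a totality guard (the proofs never reach 0 on the fuels used)
def dfsA (m : List (List Int)) (d : List Int) : Nat → List Int → DfsSt → DfsSt
  | 0, _, st => st
  | fuel+1, s, st =>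
    if s = d then (vset st.1 (pvG0 s) (pvG1 s), st.2.1, setf st.2.2)
    else
      (get_neighbours_port m (pvG0 s) (pvG1 s) (vset st.1 (pvG0 s) (pvG1 s))).foldl
        (fun acc n =>
          if vget acc.1 (pvG0 n) (pvG1 n) = false ∧ pvF0 acc.2.2 = false then
            if mget m (pvG0 n) (pvG1 n) = 3 ∨ mget m (pvG0 n) (pvG1 n) = 2 then
              dfsA m d fuel n (acc.1, acc.2.1 ++ [n], acc.2.2)
            else acc
          else acc)
        (vset st.1 (pvG0 s) (pvG1 s), st.2.1, st.2.2)

def dfs_find_path (m : List (List Int)) (s : List Int) (d : List Int) (visited : List (List Bool)) (p : List (List Int)) (found : List Bool) : Bool :=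
  pvF0 ((dfsA m d (cfNat visited + 3) s (visited, p, found)).2.2)

-- ===== PORT B =====
-- m[n[0]][n[1]] in (3, 2)
def valB (m : List (List Int)) (n : List Int) : Bool :=
  (mget m (pvG0 n) (pvG1 n) == 3) || (mget m (pvG0 n) (pvG1 n) == 2)

-- Source B's while loop; the stack is kept top-first (Python's append/pop at the end = cons/head here,
-- pushing reversed(ns) = prepending ns in order); fuel only as a totality guard
def loopB (m : List (List Int)) (d : List Int) : Nat → List (List Int) → DfsSt → DfsSt
  | _, [], st => st
  | fuel, c :: rest, st =>
    if pvF0 st.2.2 = true ∨ vget st.1 (pvG0 c) (pvG1 c) = true then loopB m d fuel rest st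
    else
      match fuel with
      | 0 => st
      | fuel+1 =>
        if c = d then
          loopB m d fuel rest (vset st.1 (pvG0 c) (pvG1 c), st.2.1 ++ [c], setf st.2.2)
        else
          loopB m d fuel
            (((get_neighbours_port m (pvG0 c) (pvG1 c) (vset st.1 (pvG0 c) (pvG1 c))).filter (valB m)) ++ rest)
            (vset st.1 (pvG0 c) (pvG1 c), st.2.1 ++ [c], st.2.2)
  termination_by fuel stack _ => (fuel, stack.length)

def dfs_find_path_alt (m : List (List Int)) (s : List Int) (d : List Int) (visited : List (List Bool)) (p : List (List Int)) (found : List Bool) : Bool :=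
  if s = d then pvF0 (setf found)
  else
    pvF0 ((loopB m d (cfNat (vset visited (pvG0 s) (pvG1 s)) + 1)
      ((get_neighbours_port m (pvG0 s) (pvG1 s) (vset visited (pvG0 s) (pvG1 s))).filter (valB m))
      (vset visited (pvG0 s) (pvG1 s), p, found)).2.2)

-- ===== PRECONDITION & SPEC =====
-- Pre_ is the natural domain of the task: s a cell of the grid (so A's index accesses cannot
-- raise IndexError), every row of m and of visited at least len(m[0]) long and visited at least
-- as tall as m (shorter ones make A raise when reached; a few unreached ragged shapes on which A
-- still returns are excluded too), found nonempty (found[0] raises otherwise), and s ≠ d because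
-- there A falls through its early 'return' and returns None instead of a Bool.
def Pre_dfs_find_path (m : List (List Int)) (s : List Int) (d : List Int) (visited : List (List Bool)) (p : List (List Int)) (found : List Bool) : Prop :=
  2 ≤ s.length ∧
  0 ≤ pvG0 s ∧ pvG0 s < (m.length : Int) ∧
  0 ≤ pvG1 s ∧ pvG1 s < ((m.getD 0 []).length : Int) ∧
  (∀ row ∈ m, (m.getD 0 []).length ≤ row.length) ∧
  m.length ≤ visited.length ∧
  (∀ r ∈ visited, (m.getD 0 []).length ≤ r.length) ∧
  found ≠ [] ∧ s ≠ d

instance (m : List (List Int)) (s : List Int) (d : List Int) (visited : List (List Bool)) (p : List (List Int)) (found : List Bool) : Decidable (Pre_dfs_find_path m s d visited p found) := by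
  unfold Pre_dfs_find_path; infer_instance

def pvWitness_dfs_find_path : List (List Int) × List Int × List Int × List (List Bool) × List (List Int) × List Bool :=
  ([[2, 3], [0, 2]], [0, 0], [1, 1], [[false, false], [false, false]], [], [false])

def Spec_dfs_find_path (m : List (List Int)) (s : List Int) (d : List Int) (visited : List (List Bool)) (p : List (List Int)) (found : List Bool) (out : Bool) : Prop := out = dfs_find_path_alt m s d visited p found
instance (m : List (List Int)) (s : List Int) (d : List Int) (visited : List (List Bool)) (p : List (List Int)) (found : List Bool) (out : Bool) : Decidable (Spec_dfs_find_path m s d visited p found out) := by unfold Spec_dfs_find_path; infer_instance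

-- ===== CLAIM (what is proved, stated in full; the proofs are below) =====
def Claim_equal_dfs_find_path : Prop := ∀ (m : List (List Int)) (s : List Int) (d : List Int) (visited : List (List Bool)) (p : List (List Int)) (found : List Bool), Dom_dfs_find_path m s d visited p found → Pre_dfs_find_path m s d visited p found → Spec_dfs_find_path m s d visited p found (dfs_find_path m s d visited p found)

-- ===== LEMMAS AND PROOFS =====

-- A's for-loop over a list of candidate cells, at fuel fa (dfsA (fa+1) unfolds to runA fa)
def runA (m : List (List Int)) (d : List Int) (fa : Nat) (cells : List (List Int)) (st : DfsSt) : DfsSt :=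
  cells.foldl
    (fun acc n =>
      if vget acc.1 (pvG0 n) (pvG1 n) = false ∧ pvF0 acc.2.2 = false then
        if mget m (pvG0 n) (pvG1 n) = 3 ∨ mget m (pvG0 n) (pvG1 n) = 2 then
          dfsA m d fa n (acc.1, acc.2.1 ++ [n], acc.2.2)
        else acc
      else acc)
    st

lemma dfsA_succ (m : List (List Int)) (d : List Int) (fuel : Nat) (s : List Int) (st : DfsSt) :
    dfsA m d (fuel+1) s st =
      if s = d then (vset st.1 (pvG0 s) (pvG1 s), st.2.1, setf st.2.2)
      else runA m d fuel
        (get_neighbours_port m (pvG0 s) (pvG1 s) (vset st.1 (pvG0 s) (pvG1 s)))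
        (vset st.1 (pvG0 s) (pvG1 s), st.2.1, st.2.2) := rfl

lemma runA_nil (m : List (List Int)) (d : List Int) (fa : Nat) (st : DfsSt) : runA m d fa [] st = st := rfl

lemma runA_cons (m : List (List Int)) (d : List Int) (fa : Nat) (c : List Int) (cs : List (List Int)) (st : DfsSt) :
    runA m d fa (c :: cs) st =
      runA m d fa cs
        (if vget st.1 (pvG0 c) (pvG1 c) = false ∧ pvF0 st.2.2 = false then
          if mget m (pvG0 c) (pvG1 c) = 3 ∨ mget m (pvG0 c) (pvG1 c) = 2 then
            dfsA m d fa c (st.1, st.2.1 ++ [c], st.2.2)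
          else st
        else st) := rfl

-- a cell inside the grid
def WF2 (m : List (List Int)) (c : List Int) : Prop :=
  0 ≤ pvG0 c ∧ pvG0 c < (m.length : Int) ∧ 0 ≤ pvG1 c ∧ pvG1 c < ((m.getD 0 []).length : Int)

-- visited covers the grid
def InvV (m : List (List Int)) (v : List (List Bool)) : Prop :=
  m.length ≤ v.length ∧ ∀ r ∈ v, (m.getD 0 []).length ≤ r.length

lemma setf_f0 (f : List Bool) (h : f ≠ []) : pvF0 (setf f) = true := by
  cases f with
  | nil => exact absurd rfl h
  | cons a t => rfl

lemma setf_ne (f : List Bool) (h : f ≠ []) : setf f ≠ [] := by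
  cases f with
  | nil => exact absurd rfl h
  | cons a t => simp [setf]

lemma count_set_true_le (r : List Bool) (b : Nat) : (r.set b true).count false ≤ r.count false := by
  induction r generalizing b with
  | nil => simp
  | cons x t ih =>
    cases b with
    | zero => simp [List.count_cons]
    | succ b =>
      simp only [List.set_cons_succ, List.count_cons]
      have := ih b
      omega

lemma count_set_false (r : List Bool) (b : Nat) (hb : b < r.length) (hf : r.getD b false = false) :
    (r.set b true).count false + 1 = r.count false := by
  induction r generalizing b with
  | nil => simp at hb
  | cons x t ih =>
    cases b with
    | zero => simp [List.getD] at hf; subst hf; simp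
    | succ b =>
      simp at hb
      simp [List.getD] at hf
      simp only [List.set_cons_succ, List.count_cons]
      have := ih b hb hf
      omega

lemma cf_vsetN_le (v : List (List Bool)) (a b : Nat) : cfNat (vsetN v a b) ≤ cfNat v := by
  induction v generalizing a with
  | nil => simp [vsetN, cfNat]
  | cons r t ih =>
    cases a with
    | zero => simp [vsetN, cfNat]; have := count_set_true_le r b; omega
    | succ a =>
      simp only [vsetN, List.getD_cons_succ, List.set_cons_succ, cfNat, List.map_cons, List.sum_cons]
      have := ih a
      simp only [vsetN, cfNat] at this
      omega

lemma cf_vsetN_eq (v : List (List Bool)) (a b : Nat) (ha : a < v.length)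
    (hb : b < (v.getD a []).length) (hf : vgetN v a b = false) :
    cfNat (vsetN v a b) + 1 = cfNat v := by
  induction v generalizing a with
  | nil => simp at ha
  | cons r t ih =>
    cases a with
    | zero =>
      simp only [List.getD_cons_zero] at hb
      simp only [vgetN, List.getD_cons_zero] at hf
      simp only [vsetN, List.getD_cons_zero, List.set_cons_zero, cfNat, List.map_cons, List.sum_cons]
      have := count_set_false r b hb hf
      omega
    | succ a =>
      simp at ha
      simp only [List.getD_cons_succ] at hb
      simp only [vgetN, List.getD_cons_succ] at hf
      have := ih a ha hb hf
      simp only [vsetN, List.getD_cons_succ, List.set_cons_succ, cfNat, List.map_cons, List.sum_cons]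
      simp only [vsetN, cfNat] at this
      omega

lemma getD_mem (v : List (List Bool)) (a : Nat) (ha : a < v.length) : v.getD a [] ∈ v := by
  induction v generalizing a with
  | nil => simp at ha
  | cons r t ih =>
    cases a with
    | zero => simp
    | succ a => simp at ha; exact List.mem_cons_of_mem _ (ih a ha)

lemma invV_vsetN (m : List (List Int)) (v : List (List Bool)) (a b : Nat) (h : InvV m v) :
    InvV m (vsetN v a b) := by
  by_cases ha : a < v.length
  · obtain ⟨h1, h2⟩ := h
    constructor
    · simpa [vsetN] using h1
    · intro r hr
      rcases List.mem_or_eq_of_mem_set hr with hmem | heq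
      · exact h2 r hmem
      · subst heq
        simpa using h2 _ (getD_mem v a ha)
  · rw [vsetN, List.set_eq_of_length_le (by omega)]
    exact h

-- cf strictly drops when an in-grid unvisited cell is marked
lemma cf_vset_lt (m : List (List Int)) (v : List (List Bool)) (c : List Int)
    (hW : WF2 m c) (hInv : InvV m v) (hg : vget v (pvG0 c) (pvG1 c) = false) :
    cfNat (vset v (pvG0 c) (pvG1 c)) + 1 = cfNat v := by
  obtain ⟨hx0, hx1, hy0, hy1⟩ := hW
  obtain ⟨h1, h2⟩ := hInv
  apply cf_vsetN_eq
  · omega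
  · have hmem := getD_mem v (pvG0 c).toNat (by omega)
    have := h2 _ hmem
    omega
  · exact hg

lemma neighbours_wf (m : List (List Int)) (v : List (List Bool)) (x y : Int)
    (hx0 : 0 ≤ x) (hx1 : x < (m.length : Int)) (hy0 : 0 ≤ y) (hy1 : y < ((m.getD 0 []).length : Int)) :
    ∀ n ∈ get_neighbours_port m x y v, WF2 m n := by
  intro n hn
  simp only [get_neighbours_port, List.mem_append] at hn
  rcases hn with ((h | h) | h) | h <;>
    [skip; skip; skip; skip] <;>
    · split at h <;> simp_all [WF2, pvG0, pvG1] <;> omega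

lemma loopB_found (m : List (List Int)) (d : List Int) (fuel : Nat) (stack : List (List Int)) (st : DfsSt)
    (h : pvF0 st.2.2 = true) : loopB m d fuel stack st = st := by
  induction stack with
  | nil => rw [loopB]
  | cons c rest ih => cases fuel <;> (rw [loopB]; simp [h, ih])

lemma runA_found (m : List (List Int)) (d : List Int) (fa : Nat) (cells : List (List Int)) (st : DfsSt)
    (h : pvF0 st.2.2 = true) : runA m d fa cells st = st := by
  induction cells with
  | nil => rfl
  | cons c cs ih => rw [runA_cons]; simp [h]; exact ih

-- monotone facts preserved along the search
def StR (m : List (List Int)) (s t : DfsSt) : Prop :=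
  cfNat t.1 ≤ cfNat s.1 ∧ (InvV m s.1 → InvV m t.1) ∧ (s.2.2 ≠ [] → t.2.2 ≠ [])

lemma stR_refl (m : List (List Int)) (s : DfsSt) : StR m s s := ⟨le_refl _, id, id⟩

lemma stR_trans (m : List (List Int)) {a b c : DfsSt} (h1 : StR m a b) (h2 : StR m b c) : StR m a c :=
  ⟨le_trans h2.1 h1.1, fun h => h2.2.1 (h1.2.1 h), fun h => h2.2.2 (h1.2.2 h)⟩

lemma foldl_StR (m : List (List Int)) (g : DfsSt → List Int → DfsSt)
    (h : ∀ acc n, StR m acc (g acc n)) :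
    ∀ (cells : List (List Int)) (st : DfsSt), StR m st (cells.foldl g st) := by
  intro cells
  induction cells with
  | nil => intro st; exact stR_refl m st
  | cons c cs ih => intro st; exact stR_trans m (h st c) (ih (g st c))

lemma dfsA_pres (m : List (List Int)) (d : List Int) :
    ∀ (fuel : Nat) (s : List Int) (st : DfsSt), StR m st (dfsA m d fuel s st) := by
  intro fuel
  induction fuel with
  | zero => intro s st; exact stR_refl m st
  | succ f ih =>
    intro s st
    rw [dfsA_succ]
    split
    · exact ⟨cf_vsetN_le _ _ _, fun h => invV_vsetN m _ _ _ h, fun h => setf_ne _ h⟩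
    · refine stR_trans m (b := (vset st.1 (pvG0 s) (pvG1 s), st.2.1, st.2.2)) ⟨cf_vsetN_le _ _ _, fun h => invV_vsetN m _ _ _ h, fun h => h⟩ ?_
      apply foldl_StR
      intro acc n
      split
      · split
        · exact stR_trans m (b := (acc.1, acc.2.1 ++ [n], acc.2.2)) ⟨le_refl _, id, id⟩ (ih n _)
        · exact stR_refl m acc
      · exact stR_refl m acc

lemma runA_pres (m : List (List Int)) (d : List Int) (fa : Nat) (cells : List (List Int)) (st : DfsSt) :
    StR m st (runA m d fa cells st) := by
  apply foldl_StR
  intro acc n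
  split
  · split
    · exact stR_trans m (b := (acc.1, acc.2.1 ++ [n], acc.2.2)) ⟨le_refl _, id, id⟩ (dfsA_pres m d fa n _)
    · exact stR_refl m acc
  · exact stR_refl m acc

lemma loopB_skip (m : List (List Int)) (d : List Int) (fuel : Nat) (c : List Int)
    (rest : List (List Int)) (st : DfsSt)
    (hg : pvF0 st.2.2 = true ∨ vget st.1 (pvG0 c) (pvG1 c) = true) :
    loopB m d fuel (c :: rest) st = loopB m d fuel rest st := by
  cases fuel <;> rw [loopB] <;> simp [hg]

lemma loopB_step (m : List (List Int)) (d : List Int) (fuel : Nat) (c : List Int)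
    (rest : List (List Int)) (st : DfsSt)
    (h1 : pvF0 st.2.2 = false) (h2 : vget st.1 (pvG0 c) (pvG1 c) = false) :
    loopB m d (fuel+1) (c :: rest) st =
      if c = d then
        loopB m d fuel rest (vset st.1 (pvG0 c) (pvG1 c), st.2.1 ++ [c], setf st.2.2)
      else
        loopB m d fuel
          (((get_neighbours_port m (pvG0 c) (pvG1 c) (vset st.1 (pvG0 c) (pvG1 c))).filter (valB m)) ++ rest)
          (vset st.1 (pvG0 c) (pvG1 c), st.2.1 ++ [c], st.2.2) := by
  rw [loopB]
  simp [h1, h2]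

lemma valB_iff (m : List (List Int)) (c : List Int) :
    valB m c = true ↔ (mget m (pvG0 c) (pvG1 c) = 3 ∨ mget m (pvG0 c) (pvG1 c) = 2) := by
  simp [valB]

-- the simulation: B's explicit-stack loop, run on A's (value-filtered) candidate cells on top of
-- any rest of the stack, reaches exactly the state of A's for-loop over those candidates
lemma SIM (m : List (List Int)) (d : List Int) :
    ∀ (fa : Nat) (cells rest : List (List Int)) (st : DfsSt),
      (∀ c ∈ cells, WF2 m c) →
      InvV m st.1 → st.2.2 ≠ [] →
      cfNat st.1 + 2 ≤ fa →
      loopB m d (cfNat st.1 + 1) (cells.filter (valB m) ++ rest) st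
        = loopB m d (cfNat (runA m d fa cells st).1 + 1) rest (runA m d fa cells st) := by
  intro fa
  induction fa with
  | zero =>
    intro cells rest st _ _ _ hfa
    omega
  | succ fb ihf =>
    intro cells
    induction cells with
    | nil =>
      intro rest st _ _ _ _
      simp only [List.filter_nil, List.nil_append, runA_nil]
    | cons c cs ihc =>
      intro rest st hW hInv hne hfa
      have hWc : WF2 m c := hW c (by simp)
      have hWcs : ∀ x ∈ cs, WF2 m x := fun x hx => hW x (by simp [hx])
      rw [runA_cons]
      by_cases hval : valB m c = true
      · by_cases hg : vget st.1 (pvG0 c) (pvG1 c) = false ∧ pvF0 st.2.2 = false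
        · rw [List.filter_cons_of_pos hval, List.cons_append,
            loopB_step m d (cfNat st.1) c (cs.filter (valB m) ++ rest) st hg.2 hg.1,
            if_pos hg, if_pos ((valB_iff m c).mp hval)]
          by_cases hcd : c = d
          · -- reaching the destination: found is set, and both loops collapse
            rw [if_pos hcd]
            have hA : dfsA m d (fb+1) c (st.1, st.2.1 ++ [c], st.2.2)
                = ((vset st.1 (pvG0 c) (pvG1 c), st.2.1 ++ [c], setf st.2.2) : DfsSt) := by
              rw [dfsA_succ, if_pos hcd]
            rw [hA, runA_found m d (fb+1) cs _ (setf_f0 _ hne),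
              loopB_found m d _ _ _ (setf_f0 _ hne), loopB_found m d _ _ _ (setf_f0 _ hne)]
          · -- descend into c: one step of B's loop = one recursive call of A
            rw [if_neg hcd]
            have hcf : cfNat (vset st.1 (pvG0 c) (pvG1 c)) + 1 = cfNat st.1 :=
              cf_vset_lt m st.1 c hWc hInv hg.1
            have hA : dfsA m d (fb+1) c (st.1, st.2.1 ++ [c], st.2.2)
                = runA m d fb
                    (get_neighbours_port m (pvG0 c) (pvG1 c) (vset st.1 (pvG0 c) (pvG1 c)))
                    ((vset st.1 (pvG0 c) (pvG1 c), st.2.1 ++ [c], st.2.2) : DfsSt) := by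
              rw [dfsA_succ, if_neg hcd]
            have hWns : ∀ n ∈ get_neighbours_port m (pvG0 c) (pvG1 c) (vset st.1 (pvG0 c) (pvG1 c)), WF2 m n :=
              neighbours_wf m _ (pvG0 c) (pvG1 c) hWc.1 hWc.2.1 hWc.2.2.1 hWc.2.2.2
            have hInv2 : InvV m (vset st.1 (pvG0 c) (pvG1 c)) :=
              invV_vsetN m st.1 (pvG0 c).toNat (pvG1 c).toNat hInv
            have hfb : cfNat (vset st.1 (pvG0 c) (pvG1 c)) + 2 ≤ fb := by omega
            have pres : StR m ((vset st.1 (pvG0 c) (pvG1 c), st.2.1 ++ [c], st.2.2) : DfsSt)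
                (runA m d fb (get_neighbours_port m (pvG0 c) (pvG1 c) (vset st.1 (pvG0 c) (pvG1 c)))
                  (vset st.1 (pvG0 c) (pvG1 c), st.2.1 ++ [c], st.2.2)) :=
              runA_pres m d fb _ _
            have hle : cfNat (runA m d fb (get_neighbours_port m (pvG0 c) (pvG1 c) (vset st.1 (pvG0 c) (pvG1 c)))
                (vset st.1 (pvG0 c) (pvG1 c), st.2.1 ++ [c], st.2.2)).1 ≤ cfNat (vset st.1 (pvG0 c) (pvG1 c)) :=
              pres.1
            have hInv3 : InvV m (runA m d fb (get_neighbours_port m (pvG0 c) (pvG1 c) (vset st.1 (pvG0 c) (pvG1 c)))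
                (vset st.1 (pvG0 c) (pvG1 c), st.2.1 ++ [c], st.2.2)).1 := pres.2.1 hInv2
            have hne3 : (runA m d fb (get_neighbours_port m (pvG0 c) (pvG1 c) (vset st.1 (pvG0 c) (pvG1 c)))
                (vset st.1 (pvG0 c) (pvG1 c), st.2.1 ++ [c], st.2.2)).2.2 ≠ [] := pres.2.2 hne
            rw [hA]
            calc
              loopB m d (cfNat st.1)
                  ((get_neighbours_port m (pvG0 c) (pvG1 c) (vset st.1 (pvG0 c) (pvG1 c))).filter (valB m)
                    ++ (cs.filter (valB m) ++ rest))
                  (vset st.1 (pvG0 c) (pvG1 c), st.2.1 ++ [c], st.2.2)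
                  = loopB m d (cfNat (vset st.1 (pvG0 c) (pvG1 c)) + 1)
                      ((get_neighbours_port m (pvG0 c) (pvG1 c) (vset st.1 (pvG0 c) (pvG1 c))).filter (valB m)
                        ++ (cs.filter (valB m) ++ rest))
                      (vset st.1 (pvG0 c) (pvG1 c), st.2.1 ++ [c], st.2.2) := by rw [hcf]
              _ = loopB m d
                    (cfNat (runA m d fb (get_neighbours_port m (pvG0 c) (pvG1 c) (vset st.1 (pvG0 c) (pvG1 c)))
                      (vset st.1 (pvG0 c) (pvG1 c), st.2.1 ++ [c], st.2.2)).1 + 1)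
                    (cs.filter (valB m) ++ rest)
                    (runA m d fb (get_neighbours_port m (pvG0 c) (pvG1 c) (vset st.1 (pvG0 c) (pvG1 c)))
                      (vset st.1 (pvG0 c) (pvG1 c), st.2.1 ++ [c], st.2.2)) :=
                ihf (get_neighbours_port m (pvG0 c) (pvG1 c) (vset st.1 (pvG0 c) (pvG1 c)))
                  (cs.filter (valB m) ++ rest)
                  ((vset st.1 (pvG0 c) (pvG1 c), st.2.1 ++ [c], st.2.2) : DfsSt)
                  hWns hInv2 hne hfb
              _ = loopB m d
                    (cfNat (runA m d (fb+1) cs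
                      (runA m d fb (get_neighbours_port m (pvG0 c) (pvG1 c) (vset st.1 (pvG0 c) (pvG1 c)))
                        (vset st.1 (pvG0 c) (pvG1 c), st.2.1 ++ [c], st.2.2))).1 + 1)
                    rest
                    (runA m d (fb+1) cs
                      (runA m d fb (get_neighbours_port m (pvG0 c) (pvG1 c) (vset st.1 (pvG0 c) (pvG1 c)))
                        (vset st.1 (pvG0 c) (pvG1 c), st.2.1 ++ [c], st.2.2))) :=
                ihc rest
                  (runA m d fb (get_neighbours_port m (pvG0 c) (pvG1 c) (vset st.1 (pvG0 c) (pvG1 c)))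
                    (vset st.1 (pvG0 c) (pvG1 c), st.2.1 ++ [c], st.2.2))
                  hWcs hInv3 hne3 (by omega)
        · -- guard fails at pop time: B skips, A's for-loop body is a no-op
          have hg' : pvF0 st.2.2 = true ∨ vget st.1 (pvG0 c) (pvG1 c) = true := by
            by_cases h1 : vget st.1 (pvG0 c) (pvG1 c) = false
            · by_cases h2 : pvF0 st.2.2 = false
              · exact absurd ⟨h1, h2⟩ hg
              · exact Or.inl (by simpa using h2)
            · exact Or.inr (by simpa using h1)
          rw [List.filter_cons_of_pos hval, List.cons_append, loopB_skip m d _ c _ st hg',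
            if_neg hg]
          exact ihc rest st hWcs hInv hne hfa
      · -- a non-2/3 cell: B never pushes it, A's inner value test rejects it
        have hvf : valB m c = false := by simpa using hval
        have hvp : ¬(mget m (pvG0 c) (pvG1 c) = 3 ∨ mget m (pvG0 c) (pvG1 c) = 2) :=
          fun hp => hval ((valB_iff m c).mpr hp)
        rw [List.filter_cons_of_neg (by simp [hvf])]
        have hstep : (if vget st.1 (pvG0 c) (pvG1 c) = false ∧ pvF0 st.2.2 = false then
            if mget m (pvG0 c) (pvG1 c) = 3 ∨ mget m (pvG0 c) (pvG1 c) = 2 then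
              dfsA m d (fb+1) c (st.1, st.2.1 ++ [c], st.2.2)
            else st
          else st) = st := by
          by_cases h1 : (vget st.1 (pvG0 c) (pvG1 c) = false ∧ pvF0 st.2.2 = false)
          · rw [if_pos h1, if_neg hvp]
          · rw [if_neg h1]
        rw [hstep]
        exact ihc rest st hWcs hInv hne hfa

-- ===== VERDICT (by name: the statement is the Claim_ definition above) =====
theorem dfs_find_path_spec : Claim_equal_dfs_find_path := by
  intro m s d visited p found _ hpre
  obtain ⟨hs2, hx0, hx1, hy0, hy1, hrect, hvl, hvc, hfne, hsd⟩ := hpre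
  unfold Spec_dfs_find_path dfs_find_path dfs_find_path_alt
  rw [if_neg hsd]
  have h3 : cfNat visited + 3 = (cfNat visited + 2) + 1 := by omega
  rw [h3, dfsA_succ, if_neg hsd]
  have hInv1 : InvV m (vset visited (pvG0 s) (pvG1 s)) := invV_vsetN m visited _ _ ⟨hvl, hvc⟩
  have hsim := SIM m d (cfNat visited + 2)
    (get_neighbours_port m (pvG0 s) (pvG1 s) (vset visited (pvG0 s) (pvG1 s))) []
    (vset visited (pvG0 s) (pvG1 s), p, found)
    (neighbours_wf m _ (pvG0 s) (pvG1 s) hx0 hx1 hy0 hy1)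
    hInv1 hfne
    (by have := cf_vsetN_le visited (pvG0 s).toNat (pvG1 s).toNat; simp only [vset]; omega)
  simp only [List.append_nil] at hsim
  rw [hsim, loopB]
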